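-- pv_equiv track=rewrite | github.com/Ak-Gautam/alchemy | src/alchemy/utils/json_parsing.py | _extract_first_json_span
-- ===== SOURCE A (Python) =====
-- def _extract_first_json_span(text: str) -> str | None:
--     start = -1
--     for index, char in enumerate(text):
--         if char in "{[":
--             start = index
--             break
--     if start == -1:
--         return None
--
--     stack: list[str] = []
--     in_string = False
--     escape = False
--
--     for index in range(start, len(text)):
--         char = text[index]
--         if in_string:
--             if escape:
--                 escape = False
--             elif char == "\\":
--                 escape = True
--             elif char == '"':
--                 in_string = False
--             continue
--
--         if char == '"':
--             in_string = True
--             continue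
--         if char in "{[":
--             stack.append(char)
--             continue
--         if char in "}]":
--             if not stack:
--                 return None
--             opening = stack.pop()
--             if (opening, char) not in {("{", "}"), ("[", "]")}:
--                 return None
--             if not stack:
--                 return text[start : index + 1].strip()
--     return None
-- ===== SOURCE B (Python) =====
-- def _extract_first_json_span(text: str) -> str | None:
--     first = next(((i, c) for i, c in enumerate(text) if c in "{["), None)
--     if first is None:
--         return None
--     start, opener = first
--
--     def scan(close: str, j: int, in_string: bool = False, escape: bool = False) -> int | None:
--         # index of the closer `close` pairing the opener just before j, or None;
--         # nested brackets are handled by recursion (the call stack replaces A's list stack)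
--         while j < len(text):
--             c = text[j]
--             if in_string:
--                 if escape:
--                     escape = False
--                 elif c == "\\":
--                     escape = True
--                 elif c == '"':
--                     in_string = False
--             elif c == '"':
--                 in_string = True
--             elif c in "{[":
--                 end = scan("}" if c == "{" else "]", j + 1)
--                 if end is None:
--                     return None
--                 j = end
--             elif c in "}]":
--                 return j if c == close else None
--             j += 1
--         return None
--
--     end = scan("}" if opener == "{" else "]", start + 1)
--     return text[start : end + 1].strip() if end is not None else None
-- ===== Notes on version B (the rewrite author's own statement) =====
-- stated objective: alternative
-- what changed: Replaces A's explicit list stack with a recursive bracket matcher: a scanner that, on a nested opener, recurses to find its closer and jumps past it, so the call stack carries the nesting and only the expected closing char is tracked.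
import Mathlib
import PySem

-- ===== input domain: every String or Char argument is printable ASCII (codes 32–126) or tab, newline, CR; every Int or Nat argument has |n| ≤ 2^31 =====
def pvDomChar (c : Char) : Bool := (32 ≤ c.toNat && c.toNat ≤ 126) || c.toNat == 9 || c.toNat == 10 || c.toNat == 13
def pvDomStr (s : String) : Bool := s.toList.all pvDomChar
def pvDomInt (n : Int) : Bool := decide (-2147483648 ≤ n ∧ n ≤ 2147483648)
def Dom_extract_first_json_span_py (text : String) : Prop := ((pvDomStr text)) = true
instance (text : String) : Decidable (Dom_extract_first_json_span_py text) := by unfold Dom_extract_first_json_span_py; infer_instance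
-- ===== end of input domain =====

-- B replaces A's explicit bracket stack by a recursive matcher (the call stack holds the nesting); same O(n) cost, return values proved equal.


-- ===== PORT A =====
-- A's first loop: enumerate with break, -1 sentinel kept as in the Python
def pvAFind : List Char → Nat → Int
  | [], _ => -1
  | c :: rest, i => if c = '{' ∨ c = '[' then (i : Int) else pvAFind rest (i + 1)

-- A's second loop (for index in range(start, len(text))); Python's list stack is kept
-- with its top at the HEAD (append = cons, pop = uncons); branches in source order.
def pvALoop (t : List Char) (start i : Nat) (stack : List Char) (instr esc : Bool) :
    Option String :=
  if h : i < t.length then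
    let c := t[i]
    if instr then
      if esc then pvALoop t start (i + 1) stack true false
      else if c = '\\' then pvALoop t start (i + 1) stack true true
      else if c = '"' then pvALoop t start (i + 1) stack false esc
      else pvALoop t start (i + 1) stack true esc
    else if c = '"' then pvALoop t start (i + 1) stack true esc
    else if c = '{' ∨ c = '[' then pvALoop t start (i + 1) (c :: stack) false esc
    else if c = '}' ∨ c = ']' then
      match stack with
      | [] => none
      | opening :: rest =>
        if (opening = '{' ∧ c = '}') ∨ (opening = '[' ∧ c = ']') then
          if rest = [] then
            some (String.ofList (PySem.Chars.strip
              (PySem.List.slice t (some (start : Int)) (some ((i : Int) + 1)))))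
          else pvALoop t start (i + 1) rest false esc
        else none
    else pvALoop t start (i + 1) stack false esc
  else none
termination_by t.length - i
decreasing_by all_goals omega

def extract_first_json_span_py (text : String) : Option String :=
  let t := text.toList
  let start := pvAFind t 0
  if start = -1 then none
  else pvALoop t start.toNat start.toNat [] false false

-- ===== PORT B =====
-- B's first line: next(((i, c) for i, c in enumerate(text) if c in "{["), None)
def pvBFind : List Char → Nat → Option (Nat × Char)
  | [], _ => none
  | c :: rest, i => if c = '{' ∨ c = '[' then some (i, c) else pvBFind rest (i + 1)

-- close = "}" if c == "{" else "]"  (B computes this inline; named here once)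
def pvClose (c : Char) : Char := if c = '{' then '}' else ']'

-- B's recursive scanner `scan(close, j, in_string, escape)`; the fuel argument only
-- makes the nested recursion total (each call moves j forward, so t.length + 1 suffices).
def pvBScan (t : List Char) : Nat → Char → Nat → Bool → Bool → Option Nat
  | 0, _, _, _, _ => none
  | fuel + 1, close, j, instr, esc =>
    match t[j]? with
    | none => none
    | some c =>
      if instr then
        if esc then pvBScan t fuel close (j + 1) true false
        else if c = '\\' then pvBScan t fuel close (j + 1) true true
        else if c = '"' then pvBScan t fuel close (j + 1) false esc
        else pvBScan t fuel close (j + 1) true esc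
      else if c = '"' then pvBScan t fuel close (j + 1) true esc
      else if c = '{' ∨ c = '[' then
        match pvBScan t fuel (pvClose c) (j + 1) false false with
        | none => none
        | some e => pvBScan t fuel close (e + 1) false esc
      else if c = '}' ∨ c = ']' then
        if c = close then some j else none
      else pvBScan t fuel close (j + 1) false esc

def extract_first_json_span_py_alt (text : String) : Option String :=
  let t := text.toList
  match pvBFind t 0 with
  | none => none
  | some (start, opener) =>
    match pvBScan t (t.length + 1) (pvClose opener) (start + 1) false false with
    | none => none
    | some e =>
      some (String.ofList (PySem.Chars.strip
        (PySem.List.slice t (some (start : Int)) (some ((e : Int) + 1)))))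

-- ===== PRECONDITION & SPEC =====
def Spec_extract_first_json_span_py (text : String) (out : Option String) : Prop := out = extract_first_json_span_py_alt text
instance (text : String) (out : Option String) : Decidable (Spec_extract_first_json_span_py text out) := by unfold Spec_extract_first_json_span_py; infer_instance

-- ===== CLAIM (what is proved, stated in full; the proofs are below) =====
def Claim_equal_extract_first_json_span_py : Prop := ∀ (text : String), Dom_extract_first_json_span_py text → Spec_extract_first_json_span_py text (extract_first_json_span_py text)

-- ===== LEMMAS AND PROOFS =====

-- the two "find the first bracket" loops agree
theorem pvFind_rel (l : List Char) : ∀ i : Nat,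
    pvAFind l i = (match pvBFind l i with | none => -1 | some (k, _) => (k : Int)) := by
  induction l with
  | nil => intro i; simp [pvAFind, pvBFind]
  | cons c rest ih =>
    intro i
    by_cases h : c = '{' ∨ c = '['
    · simp [pvAFind, pvBFind, h]
    · simp [pvAFind, pvBFind, h, ih]

theorem pvBFind_spec (l : List Char) : ∀ (i k : Nat) (c : Char),
    pvBFind l i = some (k, c) → i ≤ k ∧ l[k - i]? = some c ∧ (c = '{' ∨ c = '[') := by
  induction l with
  | nil => intro i k c h; simp [pvBFind] at h
  | cons d rest ih =>
    intro i k c h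
    by_cases hd : d = '{' ∨ d = '['
    · simp [pvBFind, hd] at h
      obtain ⟨hk, hc⟩ := h
      subst hk; subst hc
      simp [hd]
    · simp [pvBFind, hd] at h
      obtain ⟨h1, h2, h3⟩ := ih (i + 1) k c h
      refine ⟨by omega, ?_, h3⟩
      have : k - i = (k - (i + 1)) + 1 := by omega
      rw [this]
      simpa using h2

-- a successful scan returns an index not before its starting point
theorem pvBScan_lb (t : List Char) : ∀ (fuel : Nat) (close : Char) (j : Nat)
    (instr esc : Bool) (e : Nat), pvBScan t fuel close j instr esc = some e → j ≤ e := by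
  intro fuel
  induction fuel with
  | zero => intro close j instr esc e h; simp [pvBScan] at h
  | succ fuel ih =>
    intro close j instr esc e h
    rw [pvBScan] at h
    cases hj : t[j]? with
    | none => rw [hj] at h; simp at h
    | some c =>
      rw [hj] at h; simp only [] at h
      cases instr with
      | true =>
        rw [if_pos rfl] at h
        split_ifs at h <;> exact le_trans (by omega) (ih _ _ _ _ _ h)
      | false =>
        rw [if_neg (by simp)] at h
        split_ifs at h with h2 h3 h4 h5
        · exact le_trans (by omega) (ih _ _ _ _ _ h)
        · cases hin : pvBScan t fuel (pvClose c) (j + 1) false false with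
          | none => rw [hin] at h; simp at h
          | some e1 =>
            rw [hin] at h
            have := ih _ _ _ _ _ hin
            have := ih _ _ _ _ _ h
            omega
        · cases h; omega
        · exact le_trans (by omega) (ih _ _ _ _ _ h)

-- the heart: A's loop with stack (c :: s) behaves like B's scan for c's closer,
-- followed by A's loop on the rest of the stack (or the final slice if s = [])
theorem pvLoop_eq_scan (t : List Char) (start : Nat) : ∀ (n i : Nat) (c : Char)
    (s : List Char) (instr esc : Bool) (fuel : Nat),
    t.length - i < n → t.length + 1 - i ≤ fuel → (c = '{' ∨ c = '[') →
    (instr = false → esc = false) →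
    pvALoop t start i (c :: s) instr esc =
      (match pvBScan t fuel (pvClose c) i instr esc with
       | none => none
       | some e =>
         match s with
         | [] => some (String.ofList (PySem.Chars.strip
             (PySem.List.slice t (some (start : Int)) (some ((e : Int) + 1)))))
         | c' :: s' => pvALoop t start (e + 1) (c' :: s') false false) := by
  intro n
  induction n with
  | zero => intro i c s instr esc fuel hn; omega
  | succ n ih =>
    intro i c s instr esc fuel hn hfuel hc hesc
    by_cases hi : i < t.length
    · -- fuel is at least 2, so expose one step of the scan
      obtain ⟨f, rfl⟩ : ∃ f, fuel = f + 1 := ⟨fuel - 1, by omega⟩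
      have hf : t.length + 1 - (i + 1) ≤ f := by omega
      have hjt : t[i]? = some t[i] := List.getElem?_eq_getElem hi
      rw [pvALoop, dif_pos hi, pvBScan, hjt]
      simp only []
      set d := t[i] with hd
      cases instr with
      | true =>
        rw [if_pos rfl, if_pos rfl]
        split_ifs with h2 h3 h4
        · rw [ih (i + 1) c s true false f (by omega) hf hc (by simp)]
        · rw [ih (i + 1) c s true true f (by omega) hf hc (by simp)]
        · rw [ih (i + 1) c s false esc f (by omega) hf hc
            (fun _ => by cases esc <;> simp_all)]
        · rw [ih (i + 1) c s true esc f (by omega) hf hc (by simp)]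
      | false =>
        have hesc' : esc = false := hesc rfl
        subst hesc'
        simp only [Bool.false_eq_true, if_false]
        by_cases h2 : d = '"'
        · rw [if_pos h2, if_pos h2, ih (i + 1) c s true false f (by omega) hf hc (by simp)]
        · rw [if_neg h2, if_neg h2]
          by_cases h3 : d = '{' ∨ d = '['
          · -- nested opener d: A pushes, B recurses
            rw [if_pos h3, if_pos h3,
              ih (i + 1) d (c :: s) false false f (by omega) hf h3 (by simp)]
            cases hin : pvBScan t f (pvClose d) (i + 1) false false with
            | none => simp
            | some e1 =>
              simp only
              have he1 : i + 1 ≤ e1 := pvBScan_lb t f _ _ _ _ _ hin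
              rw [ih (e1 + 1) c s false false f (by omega) (by omega) hc (by simp)]
          · rw [if_neg h3, if_neg h3]
            by_cases h4 : d = '}' ∨ d = ']'
            · -- closer d: A pops, B returns (or both fail on a mismatch)
              rw [if_pos h4, if_pos h4]
              have hpair : ((c = '{' ∧ d = '}') ∨ (c = '[' ∧ d = ']')) ↔ (d = pvClose c) := by
                unfold pvClose
                rcases hc with hc | hc <;> subst hc <;> simp
              by_cases hm : d = pvClose c
              · rw [if_pos (hpair.mpr hm), if_pos hm]
                cases s with
                | nil => simp
                | cons c' s' => simp
              · rw [if_neg (fun hcon => hm (hpair.mp hcon)), if_neg hm]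
            · rw [if_neg h4, if_neg h4,
                ih (i + 1) c s false false f (by omega) hf hc (by simp)]
    · -- i past the end: both sides stop with none
      rw [pvALoop, dif_neg hi]
      have hjt : t[i]? = none := by
        simp only [List.getElem?_eq_none_iff]; omega
      cases fuel with
      | zero => simp [pvBScan]
      | succ f => rw [pvBScan, hjt]

-- ===== VERDICT (by name: the statement is the Claim_ definition above) =====
theorem extract_first_json_span_py_spec : Claim_equal_extract_first_json_span_py := by
  unfold Claim_equal_extract_first_json_span_py
  intro text _
  unfold Spec_extract_first_json_span_py
  unfold extract_first_json_span_py extract_first_json_span_py_alt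
  set t := text.toList with ht
  cases hfind : pvBFind t 0 with
  | none => simp [pvFind_rel t 0, hfind]
  | some kc =>
    obtain ⟨k, c⟩ := kc
    obtain ⟨-, hk2, hk3⟩ := pvBFind_spec t 0 k c hfind
    simp only [Nat.sub_zero] at hk2
    have hklt : k < t.length := by
      by_contra hcon
      rw [List.getElem?_eq_none_iff.mpr (by omega)] at hk2
      simp at hk2
    have hfa : pvAFind t 0 = (k : Int) := by rw [pvFind_rel t 0, hfind]
    have hne : ¬ ((k : Int) = -1) := by omega
    simp only [hfa, if_neg hne, hfind, Int.toNat_natCast]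
    -- first iteration of A's loop at index k: push the opener and enter the stack lemma
    have htk : t[k] = c := by
      have := List.getElem?_eq_getElem hklt
      rw [this] at hk2; exact (Option.some.injEq _ _).mp hk2.symm |>.symm
    have hcq : ¬ (c = '"') := by rcases hk3 with h | h <;> subst h <;> decide
    rw [pvALoop, dif_pos hklt]
    simp only [htk]
    rw [if_neg (by simp), if_neg hcq, if_pos hk3]
    rw [pvLoop_eq_scan t k (t.length) (k + 1) c [] false false (t.length + 1)
      (by omega) (by omega) hk3 (by simp)]
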